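-- pv_equiv track=rewrite | github.com/zackmcnulty/CSE_415-AI | hw/hw1/a1.py | mystery_code
-- ===== SOURCE A (Python) =====
-- def mystery_code(s):
--     result = ""
--     for letter in s:
--         if letter.isalpha():
--             if letter.isupper():
--                 result += chr(97 + (ord(letter) - 65 + 19) % 26)
--             else:
--                 result += chr(65 + (ord(letter) - 97 + 19) % 26)
--         else:
--             result += letter
--
--     return result
-- ===== SOURCE B (Python) =====
-- def mystery_code(s):
--     upper = ''.join(chr(c) for c in range(65, 91))
--     lower = ''.join(chr(c) for c in range(97, 123))
--     to_upper = ''.join(chr(97 + (c - 65 + 19) % 26) for c in range(65, 91))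
--     to_lower = ''.join(chr(65 + (c - 97 + 19) % 26) for c in range(97, 123))
--     table = str.maketrans(upper + lower, to_upper + to_lower)
--     return s.translate(table)
-- ===== Notes on version B (the rewrite author's own statement) =====
-- stated objective: idiomatic
-- what changed: Replaces the per-character if/elif string-concatenation loop by building a 52-entry translation table once (str.maketrans) and applying s.translate in a single call, with unmapped characters passing through.
import Mathlib
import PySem

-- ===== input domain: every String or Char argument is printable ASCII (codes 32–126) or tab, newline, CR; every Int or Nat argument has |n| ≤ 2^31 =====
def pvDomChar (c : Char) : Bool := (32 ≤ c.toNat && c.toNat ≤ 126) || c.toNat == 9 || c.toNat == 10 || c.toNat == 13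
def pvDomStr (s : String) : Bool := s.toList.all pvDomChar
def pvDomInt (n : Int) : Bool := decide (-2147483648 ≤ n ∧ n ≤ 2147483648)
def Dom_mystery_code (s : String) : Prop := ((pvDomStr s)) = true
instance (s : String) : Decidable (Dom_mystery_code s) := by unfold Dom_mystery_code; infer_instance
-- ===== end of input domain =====

-- B builds a translation table once and translates in one pass; A maps each char through branches (idiomatic rewrite, same result).

-- ===== PORT A =====
def mystery_code (s : String) : String :=
  s.toList.foldl (fun result letter =>
    if PySem.Chars.isalpha letter then
      if PySem.Chars.isupper letter then
        result.push (Char.ofNat (97 + PySem.Int.mod ((letter.toNat : Int) - 65 + 19) 26).toNat)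
      else
        result.push (Char.ofNat (65 + PySem.Int.mod ((letter.toNat : Int) - 97 + 19) 26).toNat)
    else
      result.push letter) ""

-- ===== PORT B =====
-- translation table: 26 uppercase ↦ shifted lowercase, 26 lowercase ↦ shifted uppercase
def mcTable : PySem.Dict Char Char :=
  let d := (PySem.List.pyRange 65 91 1).foldl (fun d c =>
    d.insert (Char.ofNat c.toNat) (Char.ofNat (97 + PySem.Int.mod (c - 65 + 19) 26).toNat))
    (PySem.Dict.empty)
  (PySem.List.pyRange 97 123 1).foldl (fun d c =>
    d.insert (Char.ofNat c.toNat) (Char.ofNat (65 + PySem.Int.mod (c - 97 + 19) 26).toNat)) d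

def mystery_code_alt (s : String) : String :=
  String.ofList (s.toList.map (fun c => mcTable.getD c c))

-- ===== PRECONDITION & SPEC =====
def Spec_mystery_code (s : String) (out : String) : Prop := out = mystery_code_alt s
instance (s : String) (out : String) : Decidable (Spec_mystery_code s out) := by unfold Spec_mystery_code; infer_instance

-- ===== CLAIM (what is proved, stated in full; the proofs are below) =====
def Claim_equal_mystery_code : Prop := ∀ (s : String), Dom_mystery_code s → Spec_mystery_code s (mystery_code s)

-- ===== LEMMAS AND PROOFS =====
-- A's per-character value, factored out of the fold
def mcA (letter : Char) : Char :=
  if PySem.Chars.isalpha letter then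
    if PySem.Chars.isupper letter then
      Char.ofNat (97 + PySem.Int.mod ((letter.toNat : Int) - 65 + 19) 26).toNat
    else
      Char.ofNat (65 + PySem.Int.mod ((letter.toNat : Int) - 97 + 19) 26).toNat
  else letter

set_option maxRecDepth 20000 in
theorem mc_char_eq : ∀ n < 128, mcA (Char.ofNat n) = mcTable.getD (Char.ofNat n) (Char.ofNat n) := by decide

theorem mc_foldl (l : List Char) (acc : String) :
    l.foldl (fun result letter =>
      if PySem.Chars.isalpha letter then
        if PySem.Chars.isupper letter then
          result.push (Char.ofNat (97 + PySem.Int.mod ((letter.toNat : Int) - 65 + 19) 26).toNat)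
        else
          result.push (Char.ofNat (65 + PySem.Int.mod ((letter.toNat : Int) - 97 + 19) 26).toNat)
      else
        result.push letter) acc = acc ++ String.ofList (l.map mcA) := by
  induction l generalizing acc with
  | nil => apply String.ext; simp
  | cons c t ih =>
      simp only [List.foldl_cons, List.map_cons, ih]
      have hstep : (if PySem.Chars.isalpha c then
          if PySem.Chars.isupper c then
            acc.push (Char.ofNat (97 + PySem.Int.mod ((c.toNat : Int) - 65 + 19) 26).toNat)
          else
            acc.push (Char.ofNat (65 + PySem.Int.mod ((c.toNat : Int) - 97 + 19) 26).toNat)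
        else acc.push c) = acc.push (mcA c) := by
        unfold mcA; split_ifs <;> rfl
      rw [hstep]
      have : acc.push (mcA c) = acc ++ String.ofList [mcA c] := by
        apply String.ext; simp [String.toList_ofList]
      rw [this, String.append_assoc]
      congr 1
      apply String.ext
      simp [String.toList_ofList]

-- ===== VERDICT (by name: the statement is the Claim_ definition above) =====
theorem mystery_code_spec : Claim_equal_mystery_code := by
  intro s hdom
  unfold Spec_mystery_code mystery_code mystery_code_alt
  rw [mc_foldl]
  have hmap : s.toList.map mcA = s.toList.map (fun c => mcTable.getD c c) := by
    apply List.map_congr_left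
    intro c hc
    have hd : pvDomChar c = true := by
      have := (List.all_eq_true.mp hdom) c hc
      simpa [pvDomChar] using this
    have hlt : c.toNat < 128 := by
      simp only [pvDomChar, Bool.or_eq_true, Bool.and_eq_true, decide_eq_true_eq,
        beq_iff_eq] at hd
      omega
    have := mc_char_eq c.toNat hlt
    simpa [Char.ofNat_toNat] using this
  rw [hmap]
  apply String.ext; simp [String.toList_ofList]
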